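-- pv_equiv track=rewrite | github.com/2026-ASU-WiCS-Opportunity-Hack/17-noobhackers | backend/lambda/templates/handler.py | _resolve_role_from_groups
-- ===== SOURCE A (Python) =====
-- from typing import Any, Dict, List, Optional
--
-- def _resolve_role_from_groups(groups: List[str]) -> str:
--     """Resolve the highest-privilege role from Cognito group names.
--
--     Mirrors the logic in auth/handler.py but kept local to avoid
--     cross-Lambda import dependencies.
--     """
--     group_priority = {
--         "SuperAdmins": "Super_Admin",
--         "ChapterLeads": "Chapter_Lead",
--         "ContentCreators": "Content_Creator",
--         "Coaches": "Coach",
--     }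
--     priority_order = ["SuperAdmins", "ChapterLeads", "ContentCreators", "Coaches"]
--
--     for group_name in priority_order:
--         if group_name in groups:
--             return group_priority[group_name]
--     return "Coach"
-- ===== SOURCE B (Python) =====
-- _PRIORITY_IDX = {"SuperAdmins": 0, "ChapterLeads": 1, "ContentCreators": 2, "Coaches": 3}
-- _ROLES = ["Super_Admin", "Chapter_Lead", "Content_Creator", "Coach"]
--
-- def _resolve_role_from_groups(groups):
--     """One pass over the caller's groups keeping the best (lowest) priority index."""
--     best = 4
--     for g in groups:
--         best = min(best, _PRIORITY_IDX.get(g, 4))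
--     return _ROLES[best] if best < 4 else "Coach"
-- ===== Notes on version B (the rewrite author's own statement) =====
-- stated objective: alternative
-- what changed: B makes one pass over the caller's groups keeping the minimum priority index (a fold), instead of probing the fixed priority list in order with membership tests and early return.
import Mathlib
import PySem

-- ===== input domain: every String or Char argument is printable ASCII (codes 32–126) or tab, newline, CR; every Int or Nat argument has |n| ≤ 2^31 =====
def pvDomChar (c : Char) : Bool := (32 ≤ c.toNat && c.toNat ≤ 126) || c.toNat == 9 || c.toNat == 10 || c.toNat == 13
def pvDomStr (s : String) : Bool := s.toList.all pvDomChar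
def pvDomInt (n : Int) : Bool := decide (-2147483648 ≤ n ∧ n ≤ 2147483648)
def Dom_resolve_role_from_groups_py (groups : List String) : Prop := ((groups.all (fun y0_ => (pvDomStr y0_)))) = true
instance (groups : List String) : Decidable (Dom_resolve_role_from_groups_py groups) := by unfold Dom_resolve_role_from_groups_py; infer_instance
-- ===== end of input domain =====

-- B folds once over the caller's groups keeping the minimum priority index, instead of A's ordered membership probes with early return (objective: alternative decomposition).

-- ===== PORT A =====
-- A probes the fixed priority list in order and returns the mapped role at the first hit.
def resolve_role_from_groups_py (groups : List String) : String :=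
  if "SuperAdmins" ∈ groups then "Super_Admin"
  else if "ChapterLeads" ∈ groups then "Chapter_Lead"
  else if "ContentCreators" ∈ groups then "Content_Creator"
  else if "Coaches" ∈ groups then "Coach"
  else "Coach"

-- ===== PORT B =====
-- _PRIORITY_IDX.get(g, 4)
def pvIdxOf (g : String) : Nat :=
  if g = "SuperAdmins" then 0
  else if g = "ChapterLeads" then 1
  else if g = "ContentCreators" then 2
  else if g = "Coaches" then 3
  else 4

def pvRoles : List String := ["Super_Admin", "Chapter_Lead", "Content_Creator", "Coach"]

def resolve_role_from_groups_py_alt (groups : List String) : String :=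
  let best := groups.foldl (fun b g => min b (pvIdxOf g)) 4
  if best < 4 then pvRoles.getD best "Coach" else "Coach"

-- ===== PRECONDITION & SPEC =====
def Spec_resolve_role_from_groups_py (groups : List String) (out : String) : Prop := out = resolve_role_from_groups_py_alt groups
instance (groups : List String) (out : String) : Decidable (Spec_resolve_role_from_groups_py groups out) := by unfold Spec_resolve_role_from_groups_py; infer_instance

-- ===== CLAIM (what is proved, stated in full; the proofs are below) =====
def Claim_equal_resolve_role_from_groups_py : Prop := ∀ (groups : List String), Dom_resolve_role_from_groups_py groups → Spec_resolve_role_from_groups_py groups (resolve_role_from_groups_py groups)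

-- ===== LEMMAS AND PROOFS =====

-- index of the highest-priority group present (4 if none)
def pvFirstIdx (groups : List String) : Nat :=
  if "SuperAdmins" ∈ groups then 0
  else if "ChapterLeads" ∈ groups then 1
  else if "ContentCreators" ∈ groups then 2
  else if "Coaches" ∈ groups then 3
  else 4

theorem pvFirstIdx_le (groups : List String) : pvFirstIdx groups ≤ 4 := by
  unfold pvFirstIdx; split_ifs <;> omega

theorem pvFirstIdx_cons (g : String) (gs : List String) :
    pvFirstIdx (g :: gs) = min (pvIdxOf g) (pvFirstIdx gs) := by
  by_cases h1 : g = "SuperAdmins" <;> by_cases h2 : g = "ChapterLeads" <;>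
    by_cases h3 : g = "ContentCreators" <;> by_cases h4 : g = "Coaches" <;>
    simp_all [pvFirstIdx, pvIdxOf, List.mem_cons, eq_comm] <;> split_ifs <;> omega

theorem pv_fold_eq (gs : List String) : ∀ b : Nat, b ≤ 4 →
    gs.foldl (fun b g => min b (pvIdxOf g)) b = min b (pvFirstIdx gs) := by
  induction gs with
  | nil => intro b hb; simp [pvFirstIdx]; omega
  | cons g gs ih =>
      intro b hb
      have hidx : pvIdxOf g ≤ 4 := by unfold pvIdxOf; split_ifs <;> omega
      simp only [List.foldl_cons]
      rw [ih (min b (pvIdxOf g)) (by omega), pvFirstIdx_cons]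
      omega

-- ===== VERDICT (by name: the statement is the Claim_ definition above) =====
theorem resolve_role_from_groups_py_spec : Claim_equal_resolve_role_from_groups_py := by
  intro groups _
  unfold Spec_resolve_role_from_groups_py resolve_role_from_groups_py_alt
  rw [pv_fold_eq groups 4 (le_refl 4)]
  have h4 := pvFirstIdx_le groups
  rw [min_eq_right h4]
  unfold resolve_role_from_groups_py pvFirstIdx
  split_ifs <;> rfl
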